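-- pv_equiv track=rewrite | github.com/Dakai666/Loom | loom/core/cognition/skill_mutator.py | _looks_like_skill_md
-- ===== SOURCE A (Python) =====
-- def _looks_like_skill_md(body: str, parent_body: str) -> bool:
--     """Quick plausibility check before persisting a candidate.
--
--     Hard enough that random LLM preamble is rejected, lenient enough
--     that a genuine rewrite passes. We don't enforce frontmatter equality
--     byte-for-byte because trailing whitespace commonly drifts; the PR 3
--     promotion step will do a stricter diff when it actually writes the
--     file.
--     """
--     if not body:
--         return False
--     # Require some length and at least one shared non-trivial line with
--     # the parent so we don't accept a hallucinated skill from another domain.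
--     if len(body) < 80:
--         return False
--     parent_lines = {l.strip() for l in parent_body.splitlines() if len(l.strip()) > 20}
--     if not parent_lines:
--         return True  # parent was essentially empty — nothing to anchor against
--     new_lines = {l.strip() for l in body.splitlines() if len(l.strip()) > 20}
--     return bool(parent_lines & new_lines)
-- ===== SOURCE B (Python) =====
-- def _looks_like_skill_md(body: str, parent_body: str) -> bool:
--     if not body:
--         return False
--     if len(body) < 80:
--         return False
--     anchors = sorted({l.strip() for l in parent_body.splitlines() if len(l.strip()) > 20})
--     if not anchors:
--         return True
--     news = sorted({l.strip() for l in body.splitlines() if len(l.strip()) > 20})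
--     i = j = 0
--     while i < len(anchors) and j < len(news):
--         if anchors[i] == news[j]:
--             return True
--         if anchors[i] < news[j]:
--             i += 1
--         else:
--             j += 1
--     return False
-- ===== Notes on version B (the rewrite author's own statement) =====
-- stated objective: alternative
-- what changed: B keeps the guards but replaces A's two hash sets and set intersection by sorting both deduplicated non-trivial line lists and detecting a shared line with a two-pointer merge scan that advances the pointer holding the lexicographically smaller line.
import Mathlib
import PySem

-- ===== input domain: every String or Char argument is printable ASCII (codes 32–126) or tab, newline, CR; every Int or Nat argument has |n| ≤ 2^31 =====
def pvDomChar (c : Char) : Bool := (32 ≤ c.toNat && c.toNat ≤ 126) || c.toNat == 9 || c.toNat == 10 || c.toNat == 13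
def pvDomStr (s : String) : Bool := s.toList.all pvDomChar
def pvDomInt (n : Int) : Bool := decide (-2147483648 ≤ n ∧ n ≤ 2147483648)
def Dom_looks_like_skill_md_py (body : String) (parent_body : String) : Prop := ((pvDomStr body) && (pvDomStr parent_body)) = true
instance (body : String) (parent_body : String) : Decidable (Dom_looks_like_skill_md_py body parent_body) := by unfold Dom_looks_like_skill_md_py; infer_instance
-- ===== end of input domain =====

-- B keeps A's guards but replaces the two hash sets and their intersection by sorting both
-- deduplicated non-trivial line lists and scanning them with a two-pointer merge (alternative
-- algorithm; return value only, no mutation).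

-- ===== PORT A =====
def looks_like_skill_md_py (body : String) (parent_body : String) : Bool :=
  if body = "" then false
  else if PySem.Str.len body < 80 then false
  else
    let parent_lines : PySem.Set String :=
      PySem.Set.ofList (((PySem.Str.splitlines parent_body).filter
        (fun l => 20 < PySem.Str.len (PySem.Str.strip l))).map PySem.Str.strip)
    if parent_lines = [] then true
    else
      let new_lines : PySem.Set String :=
        PySem.Set.ofList (((PySem.Str.splitlines body).filter
          (fun l => 20 < PySem.Str.len (PySem.Str.strip l))).map PySem.Str.strip)
      !(PySem.Set.inter parent_lines new_lines).isEmpty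

-- ===== PORT B =====
-- the while-loop of Source B: two-pointer merge scan over the two sorted lists
def mergeHasCommon : List String → List String → Bool
  | [], _ => false
  | _ :: _, [] => false
  | a :: as, b :: bs =>
    if a = b then true
    else if a < b then mergeHasCommon as (b :: bs)
    else mergeHasCommon (a :: as) bs
  termination_by xs ys => xs.length + ys.length

def looks_like_skill_md_py_alt (body : String) (parent_body : String) : Bool :=
  if body = "" then false
  else if PySem.Str.len body < 80 then false
  else
    let anchors : List String :=
      PySem.List.sorted (PySem.Set.ofList (((PySem.Str.splitlines parent_body).filter
        (fun l => 20 < PySem.Str.len (PySem.Str.strip l))).map PySem.Str.strip)) (fun x => x) false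
    if anchors = [] then true
    else
      let news : List String :=
        PySem.List.sorted (PySem.Set.ofList (((PySem.Str.splitlines body).filter
          (fun l => 20 < PySem.Str.len (PySem.Str.strip l))).map PySem.Str.strip)) (fun x => x) false
      mergeHasCommon anchors news

-- ===== PRECONDITION & SPEC =====
def Spec_looks_like_skill_md_py (body : String) (parent_body : String) (out : Bool) : Prop := out = looks_like_skill_md_py_alt body parent_body
instance (body : String) (parent_body : String) (out : Bool) : Decidable (Spec_looks_like_skill_md_py body parent_body out) := by unfold Spec_looks_like_skill_md_py; infer_instance

-- ===== CLAIM =====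
def Claim_equal_looks_like_skill_md_py : Prop := ∀ (body : String) (parent_body : String), Dom_looks_like_skill_md_py body parent_body → Spec_looks_like_skill_md_py body parent_body (looks_like_skill_md_py body parent_body)

-- ===== LEMMAS AND PROOFS =====

-- the merge scan finds exactly the common elements, on strictly sorted lists
theorem mergeHasCommon_iff (xs ys : List String)
    (hx : xs.Pairwise (· < ·)) (hy : ys.Pairwise (· < ·)) :
    mergeHasCommon xs ys = true ↔ ∃ a, a ∈ xs ∧ a ∈ ys := by
  fun_induction mergeHasCommon xs ys with
  | case1 ys => simp
  | case2 a as => simp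
  | case3 as x bs => exact iff_of_true rfl ⟨x, by simp, by simp⟩
  | case4 a as b bs hne hlt ih =>
    rw [List.pairwise_cons] at hx
    rw [ih hx.2 hy]
    constructor
    · rintro ⟨c, hc1, hc2⟩; exact ⟨c, List.mem_cons_of_mem _ hc1, hc2⟩
    · rintro ⟨c, hc1, hc2⟩
      rcases List.mem_cons.mp hc1 with rfl | h
      · exfalso
        rcases List.mem_cons.mp hc2 with rfl | h2
        · exact hne rfl
        · have hb : b < c := (List.pairwise_cons.mp hy).1 c h2
          exact absurd (lt_trans hlt hb) (lt_irrefl c)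
      · exact ⟨c, h, hc2⟩
  | case5 a as b bs hne hlt ih =>
    have hba : b < a := by
      rcases lt_trichotomy a b with h | h | h
      · exact absurd h hlt
      · exact absurd h hne
      · exact h
    rw [List.pairwise_cons] at hy
    rw [ih hx hy.2]
    constructor
    · rintro ⟨c, hc1, hc2⟩; exact ⟨c, hc1, List.mem_cons_of_mem _ hc2⟩
    · rintro ⟨c, hc1, hc2⟩
      rcases List.mem_cons.mp hc2 with rfl | h
      · exfalso
        rcases List.mem_cons.mp hc1 with rfl | h1
        · exact hne rfl
        · have ha : a < c := (List.pairwise_cons.mp hx).1 c h1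
          exact absurd (lt_trans hba ha) (lt_irrefl c)
      · exact ⟨c, hc1, h⟩

theorem key_lemma (P N : List String) :
    (!(PySem.Set.inter (PySem.Set.ofList P) (PySem.Set.ofList N)).isEmpty)
      = mergeHasCommon (PySem.List.sorted (PySem.Set.ofList P) (fun x => x) false)
          (PySem.List.sorted (PySem.Set.ofList N) (fun x => x) false) := by
  rw [Bool.eq_iff_iff]
  rw [mergeHasCommon_iff _ _ (PySem.List.sorted_ofList_pairwise_lt P)
    (PySem.List.sorted_ofList_pairwise_lt N)]
  simp only [Bool.not_eq_eq_eq_not, Bool.not_true, List.isEmpty_eq_false_iff_exists_mem,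
    PySem.Set.mem_inter, PySem.List.mem_sorted]

-- ===== VERDICT =====
theorem looks_like_skill_md_py_spec : Claim_equal_looks_like_skill_md_py := by
  intro body parent_body _
  unfold Spec_looks_like_skill_md_py looks_like_skill_md_py looks_like_skill_md_py_alt
  by_cases h1 : body = ""
  · rw [if_pos h1, if_pos h1]
  rw [if_neg h1, if_neg h1]
  by_cases h2 : PySem.Str.len body < 80
  · rw [if_pos h2, if_pos h2]
  rw [if_neg h2, if_neg h2]
  by_cases h3 : PySem.Set.ofList (((PySem.Str.splitlines parent_body).filter
      (fun l => decide (20 < PySem.Str.len (PySem.Str.strip l)))).map PySem.Str.strip) = []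
  · rw [if_pos h3, if_pos (by rw [h3]; simp [PySem.List.sorted])]
  · have h4 : PySem.List.sorted (PySem.Set.ofList (((PySem.Str.splitlines parent_body).filter
        (fun l => decide (20 < PySem.Str.len (PySem.Str.strip l)))).map PySem.Str.strip)) (fun x => x) false ≠ [] := by
      simp only [ne_eq, PySem.List.sorted_eq_nil_iff]
      exact h3
    rw [if_neg h3, if_neg h4]
    exact key_lemma _ _
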